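-- pv_equiv track=rewrite | github.com/MouseRider/skills-tsvc | exchange-logger/tsvc-exchange-logger.py | get_topic_at_time
-- ===== SOURCE A (Python) =====
-- def get_topic_at_time(timeline, timestamp_ms, fallback_topic):
--     """
--     Given a sorted timeline of (timestamp_ms, topic_id) switches,
--     find which topic was active at the given timestamp.
--     Uses binary search for efficiency.
--     """
--     if not timeline:
--         return fallback_topic
--
--     # Binary search: find the last switch that happened at or before timestamp_ms
--     lo, hi = 0, len(timeline) - 1
--     result = None
--
--     while lo <= hi:
--         mid = (lo + hi) // 2
--         if timeline[mid][0] <= timestamp_ms: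
--             result = timeline[mid][1]
--             lo = mid + 1
--         else:
--             hi = mid - 1
--
--     return result if result else fallback_topic
-- ===== SOURCE B (Python) =====
-- def get_topic_at_time(timeline, timestamp_ms, fallback_topic):
--     result = None
--     for ts, topic in timeline:
--         if ts <= timestamp_ms:
--             result = topic
--     return result if result else fallback_topic
-- ===== Notes on version B (the rewrite author's own statement) =====
-- stated objective: simpler
-- what changed: Replaces the binary search over index bounds with a single forward pass that keeps the topic of the last switch at or before the timestamp.
-- outside the precondition, e.g. on get_topic_at_time([(10, 1), (0, 2)], 5, 7): A returns 7, B returns 2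
import Mathlib
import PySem

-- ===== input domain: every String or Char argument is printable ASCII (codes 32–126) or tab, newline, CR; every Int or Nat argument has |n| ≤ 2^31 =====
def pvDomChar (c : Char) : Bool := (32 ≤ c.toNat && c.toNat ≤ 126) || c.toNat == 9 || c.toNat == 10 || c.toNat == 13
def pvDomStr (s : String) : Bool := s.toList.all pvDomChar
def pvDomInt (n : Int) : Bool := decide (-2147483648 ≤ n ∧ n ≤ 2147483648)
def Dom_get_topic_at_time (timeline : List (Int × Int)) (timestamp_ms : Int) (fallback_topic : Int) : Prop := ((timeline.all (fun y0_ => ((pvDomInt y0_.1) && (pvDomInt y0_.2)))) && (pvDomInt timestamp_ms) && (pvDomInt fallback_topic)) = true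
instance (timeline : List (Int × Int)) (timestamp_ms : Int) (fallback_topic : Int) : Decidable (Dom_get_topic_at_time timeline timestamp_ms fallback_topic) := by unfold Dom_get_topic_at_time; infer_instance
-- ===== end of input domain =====

-- B replaces A's binary search with one forward pass keeping the last switch at or
-- before the timestamp (objective: simpler); equal on sorted timelines (Pre_).

-- ===== PORT A =====
-- the while-loop of A; index access timeline[mid] is always in range when
-- 0 ≤ lo ≤ mid ≤ hi < len (proved in the lemmas), so the default never fires
def getTopicLoopA (timeline : List (Int × Int)) (timestamp_ms : Int)
    (lo hi : Int) (result : Option Int) : Option Int :=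
  -- Python's locals `mid` and `e = timeline[mid]` are written out inline
  if h : lo ≤ hi then
    if ((PySem.List.pyGet? timeline (PySem.Int.floordiv (lo + hi) 2)).getD (0, 0)).1 ≤ timestamp_ms then
      getTopicLoopA timeline timestamp_ms (PySem.Int.floordiv (lo + hi) 2 + 1) hi
        (some ((PySem.List.pyGet? timeline (PySem.Int.floordiv (lo + hi) 2)).getD (0, 0)).2)
    else
      getTopicLoopA timeline timestamp_ms lo (PySem.Int.floordiv (lo + hi) 2 - 1) result
  else result
termination_by (hi + 1 - lo).toNat
decreasing_by
  · have := PySem.Int.floordiv_two_mid_bounds h; omega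
  · have := PySem.Int.floordiv_two_mid_bounds h; omega

def get_topic_at_time (timeline : List (Int × Int)) (timestamp_ms : Int) (fallback_topic : Int) : Int :=
  if timeline = [] then fallback_topic
  else
    match getTopicLoopA timeline timestamp_ms 0 ((timeline.length : Int) - 1) none with
    | none => fallback_topic
    | some r => if r = 0 then fallback_topic else r   -- `result if result else fallback_topic`

-- ===== PORT B =====
def get_topic_at_time_alt (timeline : List (Int × Int)) (timestamp_ms : Int) (fallback_topic : Int) : Int :=
  match timeline.foldl (fun r p => if p.1 ≤ timestamp_ms then some p.2 else r) none with
  | none => fallback_topic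
  | some r => if r = 0 then fallback_topic else r   -- `result if result else fallback_topic`

-- ===== PRECONDITION & SPEC =====
-- Pre_ excludes timelines not partitioned at the queried timestamp (a switch after
-- the timestamp preceding one at/before it): A's docstring requires a sorted timeline,
-- and on such unsorted input A's binary-search answer is an accident of the probe
-- order that no caller would specify (see cites). Every sorted timeline is admitted.
def Pre_get_topic_at_time (timeline : List (Int × Int)) (timestamp_ms : Int) (fallback_topic : Int) : Prop :=
  timeline.Pairwise (fun a b => b.1 ≤ timestamp_ms → a.1 ≤ timestamp_ms)
instance (timeline : List (Int × Int)) (timestamp_ms : Int) (fallback_topic : Int) : Decidable (Pre_get_topic_at_time timeline timestamp_ms fallback_topic) := by unfold Pre_get_topic_at_time; infer_instance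
def pvWitness_get_topic_at_time : (List (Int × Int)) × Int × Int := ([(0, 3), (5, 4), (5, 0)], 6, 9)

def Spec_get_topic_at_time (timeline : List (Int × Int)) (timestamp_ms : Int) (fallback_topic : Int) (out : Int) : Prop := out = get_topic_at_time_alt timeline timestamp_ms fallback_topic
instance (timeline : List (Int × Int)) (timestamp_ms : Int) (fallback_topic : Int) (out : Int) : Decidable (Spec_get_topic_at_time timeline timestamp_ms fallback_topic out) := by unfold Spec_get_topic_at_time; infer_instance

-- ===== CLAIM (what is proved, stated in full; the proofs are below) =====
def Claim_equal_get_topic_at_time : Prop := ∀ (timeline : List (Int × Int)) (timestamp_ms : Int) (fallback_topic : Int), Dom_get_topic_at_time timeline timestamp_ms fallback_topic → Pre_get_topic_at_time timeline timestamp_ms fallback_topic → Spec_get_topic_at_time timeline timestamp_ms fallback_topic (get_topic_at_time timeline timestamp_ms fallback_topic)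

-- ===== LEMMAS AND PROOFS =====

-- B's fold, with the accumulator generalized
lemma foldl_lastHit (timestamp_ms : Int) (xs : List (Int × Int)) (a : Option Int) (m : Nat)
    (hm : m ≤ xs.length)
    (hq : ∀ i (h : i < xs.length), i < m → (xs[i]).1 ≤ timestamp_ms)
    (hnq : ∀ i (h : i < xs.length), m ≤ i → ¬ (xs[i]).1 ≤ timestamp_ms) :
    xs.foldl (fun r p => if p.1 ≤ timestamp_ms then some p.2 else r) a
      = if hm0 : m = 0 then a else some ((xs[m-1]'(by omega)).2) := by
  induction xs generalizing a m with
  | nil => simp at hm; simp [hm]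
  | cons p xs ih =>
    match m with
    | 0 =>
      simp only [List.foldl_cons]
      have h0 : ¬ p.1 ≤ timestamp_ms := hnq 0 (by simp) (by omega)
      rw [if_neg h0]
      exact ih a 0 (by omega) (fun i h hi => by omega)
        (fun i h hi => hnq (i+1) (by simpa using h) (by omega))
    | m + 1 =>
      simp only [List.foldl_cons]
      have h0 : p.1 ≤ timestamp_ms := hq 0 (by simp) (by omega)
      rw [if_pos h0]
      have := ih (some p.2) m (by simpa using hm)
        (fun i h hi => hq (i+1) (by simpa using h) (by omega))
        (fun i h hi => hnq (i+1) (by simpa using h) (by omega))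
      rw [this]
      match m with
      | 0 => simp
      | m + 1 => simp

-- partitioned-at-timestamp transports qualification down along indices
lemma prefix_mono {timeline : List (Int × Int)} {timestamp_ms : Int}
    (hs : timeline.Pairwise (fun a b => b.1 ≤ timestamp_ms → a.1 ≤ timestamp_ms))
    {i j : Nat} (hij : i ≤ j) (hj : j < timeline.length)
    (h : (timeline[j]).1 ≤ timestamp_ms) : (timeline[i]'(by omega)).1 ≤ timestamp_ms := by
  rcases Nat.eq_or_lt_of_le hij with rfl | hlt
  · exact h
  · exact (List.pairwise_iff_getElem.mp hs) i j (by omega) hj hlt h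

-- loop invariant: A's binary search equals B's fold
lemma loopA_correct (timeline : List (Int × Int)) (timestamp_ms : Int)
    (lo hi : Int) (result : Option Int)
    (hs : timeline.Pairwise (fun a b => b.1 ≤ timestamp_ms → a.1 ≤ timestamp_ms))
    (hlo : 0 ≤ lo) (hhi : hi < (timeline.length : Int)) (hlohi : lo ≤ hi + 1)
    (hq : ∀ i (h : i < timeline.length), (i : Int) < lo → (timeline[i]).1 ≤ timestamp_ms)
    (hnq : ∀ i (h : i < timeline.length), hi < (i : Int) → ¬ (timeline[i]).1 ≤ timestamp_ms)
    (hres : result = if h0 : lo = 0 then none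
              else some ((timeline[lo.toNat - 1]'(by omega)).2)) :
    getTopicLoopA timeline timestamp_ms lo hi result
      = timeline.foldl (fun r p => if p.1 ≤ timestamp_ms then some p.2 else r) none := by
  rw [getTopicLoopA]
  by_cases h : lo ≤ hi
  · rw [dif_pos h]
    have hmid := PySem.Int.floordiv_two_mid_bounds h
    generalize hmiddef : PySem.Int.floordiv (lo + hi) 2 = mid at hmid ⊢
    have hmr0 : (0 : Int) ≤ mid := by omega
    have hmr1 : mid < (timeline.length : Int) := by omega
    rw [PySem.List.pyGet?_eq_some_getElem (xs := timeline) (i := mid) hmr0 hmr1]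
    simp only [Option.getD_some]
    by_cases hc : (timeline[mid.toNat]'(by omega)).1 ≤ timestamp_ms
    · rw [if_pos hc]
      refine loopA_correct timeline timestamp_ms (mid + 1) hi _ hs (by omega) hhi (by omega)
        ?_ hnq ?_
      · intro i hilen hi'
        exact prefix_mono hs (i := i) (j := mid.toNat) (by omega) (by omega) hc
      · rw [dif_neg (by omega)]
        have hidx : (mid + 1).toNat - 1 = mid.toNat := by omega
        simp only [hidx]
    · rw [if_neg hc]
      refine loopA_correct timeline timestamp_ms lo (mid - 1) result hs hlo (by omega) (by omega)
        hq ?_ hres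
      intro i hilen hi' hcontra
      exact hc (prefix_mono hs (i := mid.toNat) (j := i) (by omega) hilen hcontra)
  · rw [dif_neg h]
    rw [foldl_lastHit timestamp_ms timeline none lo.toNat (by omega)
      (fun i hl hi' => hq i hl (by omega))
      (fun i hl hi' => hnq i hl (by omega))]
    rw [hres]
    by_cases h0 : lo = 0
    · rw [dif_pos h0, dif_pos (by omega)]
    · rw [dif_neg h0, dif_neg (by omega)]
termination_by (hi + 1 - lo).toNat
decreasing_by
  · omega
  · omega

-- ===== VERDICT (by name: the statement is the Claim_ definition above) =====
theorem get_topic_at_time_spec : Claim_equal_get_topic_at_time := by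
  intro timeline timestamp_ms fallback_topic _ hpre
  unfold Spec_get_topic_at_time get_topic_at_time get_topic_at_time_alt
  by_cases hnil : timeline = []
  · subst hnil; simp
  · rw [if_neg hnil]
    rw [loopA_correct timeline timestamp_ms 0 ((timeline.length : Int) - 1) none hpre
      (by omega)
      (by have : 0 < timeline.length := List.length_pos_of_ne_nil hnil; omega)
      (by have : 0 < timeline.length := List.length_pos_of_ne_nil hnil; omega)
      (fun i h hi' => by omega)
      (fun i h hi' => by omega)
      (by rw [dif_pos rfl])]
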